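-- pv_equiv track=rewrite | github.com/MuLabPKU/LIFT | lift/synqa/every_sentence.py | _construct_messages
-- ===== SOURCE A (Python) =====
-- from typing import List, Optional
--
-- DEFAULT_TASK_DESCRIPTION = """# Instruction
-- You are given a paragraph extracted from an article. Please read it and generate at most {num_questions} different questions based on the content of the **last part** of the paragraph. The questions should be diverse in both their form and the content they inquire about.
-- """
--
-- DEFAULT_JSON_FORMAT = """# Output format
-- Output in the JSON format. DO NOT output anything else.
-- {
--     "qa_list": [
--         {"question": ..., "answer": ...},
--         {"question": ..., "answer": ...},
--         ...
--     ]
-- }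
-- """
--
-- DEFAULT_USER_PROMPT = """The paragraph:
-- {paragraph}
--
-- The last part of the paragraph:
-- {sentence}
--
-- Generate {num_questions} different questions based on the content of the last part of the paragraph.
-- """
--
-- def _construct_messages(sentences: List[str], use_pydantic: bool, system_role_name: str, num_tasks_per_sentence: int, extra_requirement: str):
--     batched_messages = []
--     j = 0
--     for i, sentence in enumerate(sentences):
--         while j < i and len(" ".join(sentences[j:i])) > 2048:
--             j += 1
--         preceding_paragraph = " ".join(sentences[j:i+1])
--         if use_pydantic:
--             message = [
--                 {"role": system_role_name, "content": DEFAULT_TASK_DESCRIPTION.format(num_questions=num_tasks_per_sentence) + extra_requirement},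
--                 {"role": "user", "content": DEFAULT_USER_PROMPT.format(sentence=sentence, paragraph=preceding_paragraph, num_questions=num_tasks_per_sentence)},
--             ]
--         else:
--             message = [
--                 {"role": system_role_name, "content": DEFAULT_TASK_DESCRIPTION.format(num_questions=num_tasks_per_sentence) + extra_requirement + DEFAULT_JSON_FORMAT},
--                 {"role": "user", "content": DEFAULT_USER_PROMPT.format(sentence=sentence, paragraph=preceding_paragraph, num_questions=num_tasks_per_sentence)},
--             ]
--         batched_messages.append(message)
--     return batched_messages
-- ===== SOURCE B (Python) =====
-- from typing import List, Optional
--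
-- DEFAULT_TASK_DESCRIPTION = """# Instruction
-- You are given a paragraph extracted from an article. Please read it and generate at most {num_questions} different questions based on the content of the **last part** of the paragraph. The questions should be diverse in both their form and the content they inquire about.
-- """
--
-- DEFAULT_JSON_FORMAT = """# Output format
-- Output in the JSON format. DO NOT output anything else.
-- {
--     "qa_list": [
--         {"question": ..., "answer": ...},
--         {"question": ..., "answer": ...},
--         ...
--     ]
-- }
-- """
--
-- DEFAULT_USER_PROMPT = """The paragraph:
-- {paragraph}
--
-- The last part of the paragraph:
-- {sentence}
--
-- Generate {num_questions} different questions based on the content of the last part of the paragraph.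
-- """
--
-- def _construct_messages(sentences: List[str], use_pydantic: bool, system_role_name: str, num_tasks_per_sentence: int, extra_requirement: str):
--     # prefix[k] = total characters of sentences[:k]; len(" ".join(sentences[j:i])) == prefix[i]-prefix[j]+(i-j-1) for j<i
--     prefix = [0]
--     for s in sentences:
--         prefix.append(prefix[-1] + len(s))
--     system_content = DEFAULT_TASK_DESCRIPTION.format(num_questions=num_tasks_per_sentence) + extra_requirement
--     if not use_pydantic:
--         system_content = system_content + DEFAULT_JSON_FORMAT
--     system_message = {"role": system_role_name, "content": system_content}
--     batched_messages = []
--     j = 0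
--     for i, sentence in enumerate(sentences):
--         while j < i and prefix[i] - prefix[j] + (i - j - 1) > 2048:
--             j += 1
--         preceding_paragraph = " ".join(sentences[j:i+1])
--         batched_messages.append([
--             system_message,
--             {"role": "user", "content": DEFAULT_USER_PROMPT.format(sentence=sentence, paragraph=preceding_paragraph, num_questions=num_tasks_per_sentence)},
--         ])
--     return batched_messages
-- ===== Notes on version B (the rewrite author's own statement) =====
-- stated objective: alternative
-- what changed: B precomputes a prefix-sum table of sentence lengths so the sliding-window length check is constant-time arithmetic instead of re-joining the window, and hoists the loop-invariant system message out of the loop.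
import Mathlib
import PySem

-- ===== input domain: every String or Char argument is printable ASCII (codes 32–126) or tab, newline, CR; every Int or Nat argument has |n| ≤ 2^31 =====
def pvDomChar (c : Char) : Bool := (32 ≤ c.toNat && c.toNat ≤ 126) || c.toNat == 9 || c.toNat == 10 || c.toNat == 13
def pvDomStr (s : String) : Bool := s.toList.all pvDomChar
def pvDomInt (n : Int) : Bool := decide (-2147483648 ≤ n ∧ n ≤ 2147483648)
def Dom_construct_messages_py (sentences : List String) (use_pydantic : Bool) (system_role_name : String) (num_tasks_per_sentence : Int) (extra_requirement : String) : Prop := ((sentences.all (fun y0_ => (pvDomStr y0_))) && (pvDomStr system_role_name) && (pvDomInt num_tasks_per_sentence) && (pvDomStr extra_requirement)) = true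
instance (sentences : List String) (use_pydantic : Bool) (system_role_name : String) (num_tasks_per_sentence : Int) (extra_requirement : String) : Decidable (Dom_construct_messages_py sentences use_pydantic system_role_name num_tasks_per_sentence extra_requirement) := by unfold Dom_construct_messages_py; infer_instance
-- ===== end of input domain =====

-- B replaces A's per-step re-join of the sliding window with a prefix-sum length table of sentence
-- lengths and hoists the loop-invariant system message out of the loop; same return value, proved equal below.

-- module constants / .format with a fixed template, shared by both Pythons (format = literal concatenation here)
def pvTaskDescFmt (n : Int) : String :=
  "# Instruction\nYou are given a paragraph extracted from an article. Please read it and generate at most "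
  ++ PySem.Int.toStr n
  ++ " different questions based on the content of the **last part** of the paragraph. The questions should be diverse in both their form and the content they inquire about.\n"

def pvJsonFormat : String :=
  "# Output format\nOutput in the JSON format. DO NOT output anything else.\n{\n    \"qa_list\": [\n        {\"question\": ..., \"answer\": ...},\n        {\"question\": ..., \"answer\": ...},\n        ...\n    ]\n}\n"

def pvUserPromptFmt (sentence paragraph : String) (n : Int) : String :=
  "The paragraph:\n" ++ paragraph
  ++ "\n\nThe last part of the paragraph:\n" ++ sentence
  ++ "\n\nGenerate " ++ PySem.Int.toStr n
  ++ " different questions based on the content of the last part of the paragraph.\n"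

-- ===== PORT A =====

-- A's inner 'while j < i and len(" ".join(sentences[j:i])) > 2048: j += 1'
def pvAdvanceA (all : List String) (i j : Nat) : Nat :=
  if j < i ∧ PySem.Str.len (PySem.Str.join " " (PySem.List.slice all (some (j : Int)) (some (i : Int)))) > 2048 then
    pvAdvanceA all i (j + 1)
  else j
termination_by i - j
decreasing_by omega

-- A's 'for i, sentence in enumerate(sentences)' with carried j
def pvLoopA (all : List String) (use_pydantic : Bool) (role : String) (n : Int) (extra : String) :
    List String → Nat → Nat → List (List (List (String × String)))
  | [], _, _ => []
  | sentence :: rest, i, j =>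
    let j' := pvAdvanceA all i j
    let preceding_paragraph := PySem.Str.join " " (PySem.List.slice all (some (j' : Int)) (some ((i : Int) + 1)))
    let message :=
      if use_pydantic then
        [[("role", role), ("content", pvTaskDescFmt n ++ extra)],
         [("role", "user"), ("content", pvUserPromptFmt sentence preceding_paragraph n)]]
      else
        [[("role", role), ("content", pvTaskDescFmt n ++ extra ++ pvJsonFormat)],
         [("role", "user"), ("content", pvUserPromptFmt sentence preceding_paragraph n)]]
    message :: pvLoopA all use_pydantic role n extra rest (i + 1) j'

def construct_messages_py (sentences : List String) (use_pydantic : Bool) (system_role_name : String) (num_tasks_per_sentence : Int) (extra_requirement : String) : List (List (List (String × String))) :=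
  pvLoopA sentences use_pydantic system_role_name num_tasks_per_sentence extra_requirement sentences 0 0

-- ===== PORT B =====

-- 'prefix = [0]; for s in sentences: prefix.append(prefix[-1] + len(s))' (carrying prefix[-1])
def pvPrefixGo (last : Int) : List String → List Int
  | [] => []
  | s :: rest => (last + PySem.Str.len s) :: pvPrefixGo (last + PySem.Str.len s) rest

def pvPrefix (sentences : List String) : List Int := 0 :: pvPrefixGo 0 sentences

-- B's 'while j < i and prefix[i] - prefix[j] + (i - j - 1) > 2048: j += 1'
def pvAdvanceB (pre : List Int) (i j : Nat) : Nat :=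
  if j < i ∧ PySem.List.pyGetD pre (i : Int) 0 - PySem.List.pyGetD pre (j : Int) 0 + ((i : Int) - (j : Int) - 1) > 2048 then
    pvAdvanceB pre i (j + 1)
  else j
termination_by i - j
decreasing_by omega

def pvLoopB (all : List String) (pre : List Int) (sysmsg : List (String × String)) (n : Int) :
    List String → Nat → Nat → List (List (List (String × String)))
  | [], _, _ => []
  | sentence :: rest, i, j =>
    let j' := pvAdvanceB pre i j
    let preceding_paragraph := PySem.Str.join " " (PySem.List.slice all (some (j' : Int)) (some ((i : Int) + 1)))
    [sysmsg, [("role", "user"), ("content", pvUserPromptFmt sentence preceding_paragraph n)]]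
      :: pvLoopB all pre sysmsg n rest (i + 1) j'

def construct_messages_py_alt (sentences : List String) (use_pydantic : Bool) (system_role_name : String) (num_tasks_per_sentence : Int) (extra_requirement : String) : List (List (List (String × String))) :=
  let pre := pvPrefix sentences
  let system_content0 := pvTaskDescFmt num_tasks_per_sentence ++ extra_requirement
  let system_content := if use_pydantic then system_content0 else system_content0 ++ pvJsonFormat
  pvLoopB sentences pre [("role", system_role_name), ("content", system_content)] num_tasks_per_sentence sentences 0 0

-- ===== PRECONDITION & SPEC =====
def Spec_construct_messages_py (sentences : List String) (use_pydantic : Bool) (system_role_name : String) (num_tasks_per_sentence : Int) (extra_requirement : String) (out : List (List (List (String × String)))) : Prop := out = construct_messages_py_alt sentences use_pydantic system_role_name num_tasks_per_sentence extra_requirement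
instance (sentences : List String) (use_pydantic : Bool) (system_role_name : String) (num_tasks_per_sentence : Int) (extra_requirement : String) (out : List (List (List (String × String)))) : Decidable (Spec_construct_messages_py sentences use_pydantic system_role_name num_tasks_per_sentence extra_requirement out) := by unfold Spec_construct_messages_py; infer_instance

-- ===== CLAIM (what is proved, stated in full; the proofs are below) =====
def Claim_equal_construct_messages_py : Prop := ∀ (sentences : List String) (use_pydantic : Bool) (system_role_name : String) (num_tasks_per_sentence : Int) (extra_requirement : String), Dom_construct_messages_py sentences use_pydantic system_role_name num_tasks_per_sentence extra_requirement → Spec_construct_messages_py sentences use_pydantic system_role_name num_tasks_per_sentence extra_requirement (construct_messages_py sentences use_pydantic system_role_name num_tasks_per_sentence extra_requirement)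

-- ===== LEMMAS AND PROOFS =====

-- total character count of a list of strings
def pvSumLen (l : List String) : Nat := (l.map (fun s => s.toList.length)).sum

theorem pvPrefixGo_getD (rest : List String) : ∀ (last : Int) (k : Nat), k < rest.length →
    (pvPrefixGo last rest).getD k 0 = last + (pvSumLen (rest.take (k + 1)) : Int) := by
  induction rest with
  | nil => intro _ k h; simp at h
  | cons s r ih =>
    intro last k h
    cases k with
    | zero => simp [pvPrefixGo, pvSumLen, PySem.Str.len_eq]
    | succ k =>
      simp only [pvPrefixGo, List.getD_cons_succ]
      rw [ih _ k (by simpa using h)]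
      simp [pvSumLen, PySem.Str.len_eq]
      ring

theorem pvPrefix_getD (all : List String) (k : Nat) (hk : k ≤ all.length) :
    (pvPrefix all).getD k 0 = (pvSumLen (all.take k) : Int) := by
  cases k with
  | zero => simp [pvPrefix, pvSumLen]
  | succ k =>
    simp only [pvPrefix, List.getD_cons_succ]
    rw [pvPrefixGo_getD all 0 k (by omega)]
    simp

theorem pvJoinLen (l : List String) (h : l ≠ []) :
    (PySem.Str.join " " l).toList.length = pvSumLen l + (l.length - 1) := by
  induction l with
  | nil => simp at h
  | cons s r ih =>
    cases r with
    | nil => simp [PySem.Str.toList_join, PySem.Chars.join_singleton, pvSumLen]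
    | cons t r' =>
      rw [PySem.Str.toList_join] at ih ⊢
      simp only [List.map_cons]
      rw [PySem.Chars.join_cons_cons]
      have := ih (by simp)
      simp only [List.map_cons] at this
      simp only [List.length_append, this]
      simp [pvSumLen]
      omega

theorem pvCondEq (all : List String) (i j : Nat) (hij : j < i) (hi : i ≤ all.length) :
    (PySem.Str.len (PySem.Str.join " " (PySem.List.slice all (some (j : Int)) (some (i : Int)))) > 2048
     ↔ PySem.List.pyGetD (pvPrefix all) (i : Int) 0 - PySem.List.pyGetD (pvPrefix all) (j : Int) 0 + ((i : Int) - (j : Int) - 1) > 2048) := by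
  rw [PySem.List.slice_natCast]
  rw [PySem.List.pyGetD_natCast, PySem.List.pyGetD_natCast]
  rw [pvPrefix_getD all i hi, pvPrefix_getD all j (by omega)]
  have hsl : all.take i = all.take j ++ (all.drop j).take (i - j) := by
    rw [← List.take_add]; congr 1; omega
  have hlen : ((all.drop j).take (i - j)).length = i - j := by
    simp; omega
  have hne : (all.drop j).take (i - j) ≠ [] := by
    intro h0; rw [h0] at hlen; simp at hlen; omega
  rw [PySem.Str.len_eq, pvJoinLen _ hne, hlen, hsl]
  have hsum : pvSumLen (all.take j ++ (all.drop j).take (i - j))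
      = pvSumLen (all.take j) + pvSumLen ((all.drop j).take (i - j)) := by
    simp [pvSumLen]
  rw [hsum]
  push_cast
  omega

theorem pvAdvanceA_le (all : List String) (i : Nat) : ∀ j, j ≤ i → pvAdvanceA all i j ≤ i := by
  intro j hj
  fun_induction pvAdvanceA all i j with
  | case1 j h ih => exact ih (by omega)
  | case2 j h => exact hj

theorem pvAdvance_eq (all : List String) (i : Nat) (hi : i ≤ all.length) : ∀ j, j ≤ i →
    pvAdvanceA all i j = pvAdvanceB (pvPrefix all) i j := by
  intro j hj
  fun_induction pvAdvanceA all i j with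
  | case1 j h ih =>
    rw [pvAdvanceB]
    rw [if_pos (by exact ⟨h.1, (pvCondEq all i j h.1 hi).mp h.2⟩)]
    exact ih (by omega)
  | case2 j h =>
    rw [pvAdvanceB, if_neg]
    intro hb
    exact h ⟨hb.1, (pvCondEq all i j hb.1 hi).mpr hb.2⟩

theorem pvLoop_eq (all : List String) (use_pydantic : Bool) (role : String) (n : Int) (extra : String)
    (sysmsg : List (String × String))
    (hsys : sysmsg = [("role", role), ("content",
      if use_pydantic then pvTaskDescFmt n ++ extra else pvTaskDescFmt n ++ extra ++ pvJsonFormat)]) :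
    ∀ (rest : List String) (i j : Nat), i + rest.length = all.length → j ≤ i →
      pvLoopA all use_pydantic role n extra rest i j = pvLoopB all (pvPrefix all) sysmsg n rest i j := by
  intro rest
  induction rest with
  | nil => intro i j _ _; rfl
  | cons s r ih =>
    intro i j hlen hj
    have hi : i ≤ all.length := by simp at hlen; omega
    rw [pvLoopA, pvLoopB]
    rw [← pvAdvance_eq all i hi j hj]
    congr 1
    · cases use_pydantic <;> simp [hsys]
    · exact ih (i + 1) _ (by simp at hlen ⊢; omega) (by have := pvAdvanceA_le all i j hj; omega)

-- ===== VERDICT (by name: the statement is the Claim_ definition above) =====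
theorem construct_messages_py_spec : Claim_equal_construct_messages_py := by
  intro sentences use_pydantic role n extra _
  unfold Spec_construct_messages_py construct_messages_py construct_messages_py_alt
  exact pvLoop_eq sentences use_pydantic role n extra _ (by cases use_pydantic <;> simp) sentences 0 0 (by simp) (le_refl 0)
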